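-- pv_equiv track=rewrite | github.com/UniHD-CEG/CUDAsap | conditionAnalyzer/parse_utils.py | split_equation
-- ===== SOURCE A (Python) =====
-- def find_parens(s):
--     """Find matching parentheses in a string s.
--
--     Token from https://stackoverflow.com/questions/29991917/indices-of-matching-parentheses-in-python
--
--     :param s: string to examine
--     :return: dictionary where {key: value} = {position_left_parenthesis: position_right_parenthesis}
--     """
--     toret = {}  # type: Dict[int, int]
--     pstack = []
--
--     for i, c in enumerate(s):
--         if c == '(':
--             pstack.append(i)
--         elif c == ')':
--             if len(pstack) == 0:
--                 raise IndexError("No matching closing parens at: " + str(i))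
--             toret[pstack.pop()] = i
--
--     if len(pstack) > 0:
--         raise IndexError("No matching opening parens at: " + str(pstack.pop()))
--
--     return toret
--
-- def find_bin_op_begin(cond, paren_pos, bin_op):
--     """Find the beginning index in the string cond containing a binary operator."""
--     assert isinstance(cond, str)
--     assert isinstance(bin_op, str)
--     pos = cond.find(bin_op)
--     op_begin = []
--     while pos != -1:
--         key_max = 0
--         for key in paren_pos:
--             if key < pos and key > key_max and paren_pos[key] > pos:
--                 key_max = key
--         op_begin.append(key_max)
--         pos = cond.find(bin_op, pos + 2)
--
--     return op_begin
--
-- def find_eq_begin(eq, parens_pos, is_equal):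
--     """Find the beginning indices of all (negated) equations in eq
--
--     :param eq: input string
--     :param parens_pos: dictionary of the positions of matching parentheses in eq
--     :param is_equal: boolean to switch between equation and negated equation
--     :return: list of start indices
--     """
--     cmp = "==" if is_equal else "~="
--     return find_bin_op_begin(eq, parens_pos, cmp)
--
-- def split_equation(eq, is_equal):
--     """Split string if it is an equation and convert it into a sympifiable expression.
--
--     :param eq: input string
--     :param is_equal: boolean to switch between equation and negated equation
--     :return: string eq with Eq(lhs, rhs) replacing equations if eq is an equation; else eq
--     """
--     paren_pos = find_parens(eq)
--     eq_begin_list = find_eq_begin(eq, paren_pos, is_equal)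
--     split_cmp = " == " if is_equal else " ~= "
--     sym_func = "Eq" if is_equal else "Ne"
--
--     eq_dict = {}
--     for begin in eq_begin_list:
--         end = paren_pos[begin]
--         sub_eq = eq[begin:end+1]
--         split_eq = sub_eq.split(split_cmp)
--         eq_dict[sub_eq] = sym_func+split_eq[0]+","+split_eq[1]
--
--     for key in eq_dict:
--         eq = eq.replace(key, eq_dict[key])
--
--     return eq
-- ===== SOURCE B (Python) =====
-- def split_equation(eq, is_equal):
--     """Split string if it is an equation and convert it into a sympifiable expression.
--
--     One left-to-right stack pass records, for every ==/~= occurrence, the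
--     innermost enclosing '(' (the current stack top), instead of re-scanning
--     the whole parenthesis map for each occurrence.
--     """
--     cmp, sep, sym = ("==", " == ", "Eq") if is_equal else ("~=", " ~= ", "Ne")
--     match = {}
--     stack = []
--     occs = []
--     for i, c in enumerate(eq):
--         if c == '(':
--             stack.append(i)
--         elif c == ')':
--             match[stack.pop()] = i
--         if eq.startswith(cmp, i):
--             occs.append(stack[-1] if stack else None)
--     repl = {}
--     for begin in occs:
--         if begin is None:
--             continue
--         end = match[begin]
--         sub = eq[begin:end + 1]
--         parts = sub.split(sep)
--         if len(parts) < 2: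
--             continue
--         repl[sub] = sym + parts[0] + "," + parts[1]
--     for key, val in repl.items():
--         eq = eq.replace(key, val)
--     return eq
-- ===== Notes on version B (the rewrite author's own statement) =====
-- stated objective: alternative
-- what changed: B makes a single stack pass over the string that records for every ==/~= occurrence its innermost enclosing '(' (the current stack top) in O(1), replacing A's per-occurrence linear scan over the whole parenthesis dictionary and A's repeated str.find loop by one traversal.
-- outside the precondition, e.g. on split_equation('(a == b) == c', True): A returns 'Eq(a,b) == c', B returns 'Eq(a,b) == c'; on split_equation('(x == y ==z)', True): A returns 'Eq(x,y ==z)', B returns 'Eq(x,y ==z)'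
import Mathlib
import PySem

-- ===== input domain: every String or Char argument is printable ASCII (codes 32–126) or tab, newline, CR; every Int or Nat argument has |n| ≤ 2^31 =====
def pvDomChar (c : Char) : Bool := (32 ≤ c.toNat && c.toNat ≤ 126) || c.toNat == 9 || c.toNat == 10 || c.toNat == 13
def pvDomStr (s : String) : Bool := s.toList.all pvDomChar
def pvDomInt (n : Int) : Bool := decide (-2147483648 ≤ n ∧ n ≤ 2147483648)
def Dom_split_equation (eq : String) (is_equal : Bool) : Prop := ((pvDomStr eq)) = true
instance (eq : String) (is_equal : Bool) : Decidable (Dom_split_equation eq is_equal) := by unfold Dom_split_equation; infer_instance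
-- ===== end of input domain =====

-- B replaces A's per-occurrence linear scan of the parenthesis dictionary (and its repeated
-- str.find loop) by ONE left-to-right stack pass that reads the innermost enclosing '(' of each
-- ==/~= occurrence off the stack top; objective: alternative (a single-traversal algorithm).

-- ===== PORT A =====
-- find_parens: toret dict + pstack, raising (none) on unmatched parentheses
def fpGo (rest : List Char) (i : Nat) (D : PySem.Dict Int Int) (S : List Int) :
    Option (PySem.Dict Int Int) :=
  match rest with
  | [] => if S.isEmpty then some D else none
  | c :: r =>
    if c = '(' then fpGo r (i + 1) D ((i : Int) :: S)
    else if c = ')' then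
      match S with
      | [] => none
      | j :: S' => fpGo r (i + 1) (D.insert j (i : Int)) S'
    else fpGo r (i + 1) D S

def findParens (s : List Char) : Option (PySem.Dict Int Int) :=
  fpGo s 0 PySem.Dict.empty []

-- the inner 'for key in paren_pos' loop computing key_max for one operator position
def keyMaxA (D : PySem.Dict Int Int) (pos : Int) : Int :=
  D.keys.foldl (fun km k => if k < pos ∧ km < k ∧ pos < D.getD k 0 then k else km) 0

-- the 'while pos != -1' loop of find_bin_op_begin (fuel = len(cond)+1 only makes it total:
-- pos advances by ≥ 2 each iteration, so the fuel is never exhausted)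
def fbGo (cond : List Char) (D : PySem.Dict Int Int) (binop : List Char) :
    Nat → Int → List Int → List Int
  | 0, _, acc => acc
  | fuel + 1, pos, acc =>
    if pos = -1 then acc
    else fbGo cond D binop fuel (PySem.Chars.findFrom cond binop (pos + 2) none)
           (acc ++ [keyMaxA D pos])

def findBinOpBegin (cond : List Char) (D : PySem.Dict Int Int) (binop : List Char) : List Int :=
  fbGo cond D binop (cond.length + 1) (PySem.Chars.find cond binop) []

-- the 'for begin in eq_begin_list' loop building eq_dict (none = KeyError/IndexError)
def buildA (s : List Char) (D : PySem.Dict Int Int) (sep sym : List Char)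
    (begins : List Int) : Option (PySem.Dict (List Char) (List Char)) :=
  begins.foldl
    (fun acc b => acc.bind (fun ed =>
      match D.get? b with
      | none => none
      | some e =>
        let sub := PySem.List.slice s (some b) (some (e + 1))
        match PySem.Chars.splitOn sub sep with
        | p0 :: p1 :: _ => some (ed.insert sub (sym ++ p0 ++ [','] ++ p1))
        | _ => none))
    (some PySem.Dict.empty)

def split_equation (eq : String) (is_equal : Bool) : String :=
  let s := eq.toList
  match findParens s with
  | none => ""  -- find_parens raised (unmatched parenthesis); outside Pre_
  | some D =>
    let cmp := if is_equal then ['=', '='] else ['~', '=']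
    let begins := findBinOpBegin s D cmp
    let sep := if is_equal then [' ', '=', '=', ' '] else [' ', '~', '=', ' ']
    let sym := if is_equal then ['E', 'q'] else ['N', 'e']
    match buildA s D sep sym begins with
    | none => ""  -- KeyError/IndexError in the eq_dict loop; outside Pre_
    | some d => String.mk (d.items.foldl (fun e kv => PySem.Chars.replace e kv.1 kv.2) s)

-- ===== PORT B =====
-- one pass: parenthesis matching (match/stack) and, at each ==/~= occurrence, the stack top
def scanGo (cmp : List Char) : List Char → Nat → PySem.Dict Int Int → List Int →
    List (Option Int) → Option (PySem.Dict Int Int × List (Option Int))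
  | [], _, M, _, occs => some (M, occs)
  | c :: r, i, M, St, occs =>
    let step : Option (PySem.Dict Int Int × List Int) :=
      if c = '(' then some (M, (i : Int) :: St)
      else if c = ')' then
        match St with
        | [] => none  -- stack.pop() raised
        | j :: St' => some (M.insert j (i : Int), St')
      else some (M, St)
    match step with
    | none => none
    | some (M', St') =>
      scanGo cmp r (i + 1) M' St'
        (if PySem.Chars.startswith (c :: r) cmp then occs ++ [St'.head?] else occs)

-- the 'for begin in occs' loop building repl (skips unenclosed / unsplittable occurrences)
def buildB (M : PySem.Dict Int Int) (s sep sym : List Char)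
    (occs : List (Option Int)) : Option (PySem.Dict (List Char) (List Char)) :=
  occs.foldl
    (fun acc ob => acc.bind (fun rd =>
      match ob with
      | none => some rd
      | some b =>
        match M.get? b with
        | none => none  -- match[begin] raised
        | some e =>
          let sub := PySem.List.slice s (some b) (some (e + 1))
          match PySem.Chars.splitOn sub sep with
          | p0 :: p1 :: _ => some (rd.insert sub (sym ++ p0 ++ [','] ++ p1))
          | _ => some rd))
    (some PySem.Dict.empty)

def split_equation_alt (eq : String) (is_equal : Bool) : String :=
  let s := eq.toList
  let cmp := if is_equal then ['=', '='] else ['~', '=']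
  match scanGo cmp s 0 PySem.Dict.empty [] [] with
  | none => ""  -- stack.pop() raised; outside Pre_
  | some (M, occs) =>
    let sep := if is_equal then [' ', '=', '=', ' '] else [' ', '~', '=', ' ']
    let sym := if is_equal then ['E', 'q'] else ['N', 'e']
    match buildB M s sep sym occs with
    | none => ""  -- match[begin] raised; outside Pre_
    | some d => String.mk (d.items.foldl (fun e kv => PySem.Chars.replace e kv.1 kv.2) s)

-- ===== PRECONDITION & SPEC =====
-- parenthesis weight / prefix balance (closed-form input measures used by Pre_)
def pvBalW (c : Char) : Int := if c = '(' then 1 else if c = ')' then -1 else 0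
def pvBalPfx (s : List Char) (t : Nat) : Int := ((s.take t).map pvBalW).sum

-- Pre_ admits balanced-parenthesis strings whose every ==/~= occurrence is surrounded by single
-- spaces and lies inside some parenthesis pair; on other inputs A raises IndexError/KeyError,
-- except for accidental survivals of its position-0 fallback, on which B happens to agree anyway
-- (see the cited examples in the claim).
def Pre_split_equation (eq : String) (is_equal : Bool) : Prop :=
  (∀ t, t ≤ eq.toList.length → 0 ≤ pvBalPfx eq.toList t) ∧
  pvBalPfx eq.toList eq.toList.length = 0 ∧
  (∀ i, i < eq.toList.length →
    (if is_equal then ['=', '='] else ['~', '=']) <+: eq.toList.drop i →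
    1 ≤ pvBalPfx eq.toList i ∧ 1 ≤ i ∧
    eq.toList[i - 1]? = some ' ' ∧ eq.toList[i + 2]? = some ' ')

instance (eq : String) (is_equal : Bool) : Decidable (Pre_split_equation eq is_equal) := by
  unfold Pre_split_equation; infer_instance

def pvWitness_split_equation : String × Bool := ("(a == b)", true)

def Spec_split_equation (eq : String) (is_equal : Bool) (out : String) : Prop :=
  out = split_equation_alt eq is_equal
instance (eq : String) (is_equal : Bool) (out : String) :
    Decidable (Spec_split_equation eq is_equal out) := by
  unfold Spec_split_equation; infer_instance

-- ===== CLAIM (what is proved, stated in full; the proofs are below) =====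
def Claim_equal_split_equation : Prop :=
  ∀ (eq : String) (is_equal : Bool), Dom_split_equation eq is_equal →
    Pre_split_equation eq is_equal →
    Spec_split_equation eq is_equal (split_equation eq is_equal)

-- ===== LEMMAS AND PROOFS =====

-- balance of the segment [a, b) of s
def pvBalSeg (s : List Char) (a b : Nat) : Int := pvBalPfx s b - pvBalPfx s a

-- the '(' at j is still unmatched ("open") when position p is reached
def pvOpenAt (s : List Char) (p j : Nat) : Prop :=
  j < p ∧ s[j]? = some '(' ∧ ∀ m, m ≤ p → j < m → 1 ≤ pvBalSeg s j m

def pvOpenAtDec (s : List Char) (p j : Nat) : Decidable (pvOpenAt s p j) := by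
  unfold pvOpenAt; infer_instance

-- the innermost '(' still open at p (0 when there is none)
def pvG (s : List Char) (v : Nat) : Nat :=
  @Nat.findGreatest (fun j => pvOpenAt s v j) (fun j => pvOpenAtDec s v j) v

-- the pstack contents when position p is reached (top first)
def pvStack (s : List Char) (p : Nat) : List Nat :=
  ((List.range p).filter (fun j => @decide (pvOpenAt s p j) (pvOpenAtDec s p j))).reverse

-- the matched pairs recorded after scanning s[0:t], in pop (insertion) order
def pvDict (s : List Char) (t : Nat) : List (Nat × Nat) :=
  (List.range t).filterMap (fun v => if s[v]? = some ')' then some (pvG s v, v) else none)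

def pvToDict (L : List (Nat × Nat)) : PySem.Dict Int Int :=
  L.foldl (fun d q => d.insert (q.1 : Int) (q.2 : Int)) PySem.Dict.empty

def pvToStack (L : List Nat) : List Int := L.map (fun j => (j : Int))

-- all positions where the operator cmp occurs in s
def pvOccs (s cmp : List Char) : List Nat :=
  (List.range s.length).filter (fun i => decide (cmp <+: s.drop i))

theorem pvGetLt (s : List Char) (j : Nat) (c : Char) (h : s[j]? = some c) : j < s.length := by
  by_contra hcon
  rw [List.getElem?_eq_none (by omega)] at h
  simp at h

theorem pvBalPfx_succ (s : List Char) (t : Nat) (h : t < s.length) :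
    pvBalPfx s (t + 1) = pvBalPfx s t + pvBalW s[t] := by
  unfold pvBalPfx
  rw [List.take_add_one, List.getElem?_eq_getElem h]
  simp only [Option.toList_some, List.map_append, List.sum_append, List.map_cons, List.map_nil,
    List.sum_cons, List.sum_nil]
  ring

theorem pvBalPfx_of_le (s : List Char) (t : Nat) (h : s.length ≤ t) :
    pvBalPfx s t = pvBalPfx s s.length := by
  unfold pvBalPfx
  rw [List.take_of_length_le h, List.take_of_length_le (le_refl _)]

theorem pvBalSeg_split (s : List Char) (a m b : Nat) :
    pvBalSeg s a b = pvBalSeg s a m + pvBalSeg s m b := by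
  unfold pvBalSeg; ring

theorem pvBalSeg_succ (s : List Char) (a t : Nat) (h : t < s.length) :
    pvBalSeg s a (t + 1) = pvBalSeg s a t + pvBalW s[t] := by
  unfold pvBalSeg; rw [pvBalPfx_succ s t h]; ring

theorem pvBalSeg_self (s : List Char) (a : Nat) : pvBalSeg s a a = 0 := by
  unfold pvBalSeg; ring

theorem pvBalW_eq_one (c : Char) (h : pvBalW c = 1) : c = '(' := by
  unfold pvBalW at h; split_ifs at h <;> first | assumption | omega

theorem pvBalW_eq_neg_one (c : Char) (h : pvBalW c = -1) : c = ')' := by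
  unfold pvBalW at h; split_ifs at h <;> first | assumption | omega

theorem pvBalW_open : pvBalW '(' = 1 := rfl
theorem pvBalW_close : pvBalW ')' = -1 := rfl

theorem pvBalW_other (c : Char) (h1 : c ≠ '(') (h2 : c ≠ ')') : pvBalW c = 0 := by
  unfold pvBalW; split_ifs <;> first | exact absurd ‹_› h1 | exact absurd ‹_› h2 | rfl

theorem pvOpenAt_lt_length (s : List Char) (p j : Nat) (h : pvOpenAt s p j) : j < s.length := by
  rcases h with ⟨-, hj, -⟩
  exact pvGetLt s j '(' hj

theorem pvOpenAt_mono (s : List Char) (p q j : Nat) (h : pvOpenAt s p j)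
    (hq : q ≤ p) (hj : j < q) : pvOpenAt s q j := by
  obtain ⟨-, h2, h3⟩ := h
  exact ⟨hj, h2, fun m hm hjm => h3 m (hm.trans hq) hjm⟩

-- discrete "last crossing": a positive segment balance yields an open parenthesis
theorem pvCrossing (s : List Char) (a b : Nat) (hb : b ≤ s.length) (hab : a ≤ b)
    (h1 : 1 ≤ pvBalSeg s a b) : ∃ j, a ≤ j ∧ pvOpenAt s b j := by
  classical
  set P : Nat → Prop := fun j => a ≤ j ∧ 1 ≤ pvBalSeg s j b with hP
  have hPa : P a := ⟨le_refl a, h1⟩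
  set j0 := Nat.findGreatest P b with hj0
  have hPj0 : P j0 := Nat.findGreatest_spec hab hPa
  have hgr : ∀ m, j0 < m → m ≤ b → ¬ P m := fun m hm hmb => Nat.findGreatest_is_greatest hm hmb
  obtain ⟨haj0, hbal⟩ := hPj0
  have hj0b : j0 < b := by
    have hle : j0 ≤ b := Nat.findGreatest_le (P := P) b
    rcases Nat.lt_or_ge j0 b with h | h
    · exact h
    · exfalso
      have : j0 = b := by omega
      rw [this, pvBalSeg_self] at hbal; omega
  have hseg : ∀ m, m ≤ b → j0 < m → 1 ≤ pvBalSeg s j0 m := by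
    intro m hmb hj0m
    rcases eq_or_lt_of_le hmb with rfl | hmb'
    · exact hbal
    · have hnotP : ¬ (a ≤ m ∧ 1 ≤ pvBalSeg s m b) := hgr m hj0m hmb
      have ham : a ≤ m := le_trans haj0 (le_of_lt hj0m)
      have hle0 : pvBalSeg s m b ≤ 0 := by
        by_contra hcon
        exact hnotP ⟨ham, by omega⟩
      have hsp := pvBalSeg_split s j0 m b
      unfold pvBalSeg at hsp hbal hle0 ⊢
      omega
  have hchar : s[j0]? = some '(' := by
    have h1seg : 1 ≤ pvBalSeg s j0 (j0 + 1) := hseg (j0 + 1) (by omega) (by omega)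
    have hlt : j0 < s.length := by omega
    have hstep : pvBalSeg s j0 (j0 + 1) = pvBalW s[j0] := by
      rw [pvBalSeg_succ s j0 j0 hlt, pvBalSeg_self]; ring
    have hle : pvBalW s[j0] ≤ 1 := by unfold pvBalW; split_ifs <;> omega
    have hone : pvBalW s[j0] = 1 := by omega
    rw [List.getElem?_eq_getElem hlt, pvBalW_eq_one _ hone]
  exact ⟨j0, haj0, hj0b, hchar, hseg⟩

theorem pvG_spec (s : List Char) (p : Nat) (hex : ∃ j, pvOpenAt s p j) :
    pvOpenAt s p (pvG s p) ∧ ∀ j, pvG s p < j → ¬ pvOpenAt s p j := by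
  letI : ∀ (p' j' : Nat), Decidable (pvOpenAt s p' j') := fun p' j' => pvOpenAtDec s p' j'
  classical
  obtain ⟨j, hj⟩ := hex
  have hjp : j ≤ p := le_of_lt hj.1
  constructor
  · exact Nat.findGreatest_spec hjp hj
  · intro j' hj' hoa
    by_cases h : j' ≤ p
    · exact absurd hoa (Nat.findGreatest_is_greatest hj' h)
    · exact absurd hoa.1 (by omega)

theorem pvG_eq (s : List Char) (p j : Nat) (hj : pvOpenAt s p j)
    (hmax : ∀ j', j < j' → ¬ pvOpenAt s p j') : pvG s p = j := by
  letI : ∀ (p' j' : Nat), Decidable (pvOpenAt s p' j') := fun p' j' => pvOpenAtDec s p' j'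
  have hspec := pvG_spec s p ⟨j, hj⟩
  rcases lt_trichotomy (pvG s p) j with h | h | h
  · exact absurd hj (hspec.2 j h)
  · exact h
  · exact absurd hspec.1 (hmax _ h)

theorem pvMaxOpen_balSeg_one (s : List Char) (p h : Nat) (hp : p ≤ s.length)
    (hoa : pvOpenAt s p h) (hmax : ∀ j, h < j → ¬ pvOpenAt s p j) :
    pvBalSeg s h p = 1 := by
  have hge : 1 ≤ pvBalSeg s h p := hoa.2.2 p (le_refl p) hoa.1
  by_contra hne
  have h2 : 2 ≤ pvBalSeg s h p := by omega
  have hstep : pvBalSeg s h (h + 1) = 1 := by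
    have hlt : h < s.length := pvOpenAt_lt_length s p h hoa
    rw [pvBalSeg_succ s h h hlt, pvBalSeg_self]
    have := hoa.2.1
    rw [List.getElem?_eq_getElem hlt] at this
    have hc : s[h] = '(' := Option.some.inj this
    rw [hc]; simp [pvBalW_open]
  have hsplit := pvBalSeg_split s h (h + 1) p
  have hcross : 1 ≤ pvBalSeg s (h + 1) p := by omega
  obtain ⟨j, hj1, hj2⟩ := pvCrossing s (h + 1) p hp (by have := hoa.1; omega) hcross
  exact hmax j (by omega) hj2

theorem pvOa_succ_open (s : List Char) (p j : Nat) (hc : s[p]? = some '(') :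
    pvOpenAt s (p + 1) j ↔ (j = p ∨ pvOpenAt s p j) := by
  have hp : p < s.length := pvGetLt s p _ hc
  have hw : pvBalW s[p] = 1 := by
    rw [List.getElem?_eq_getElem hp] at hc
    have : s[p] = '(' := Option.some.inj hc
    rw [this]; rfl
  constructor
  · rintro ⟨h1, h2, h3⟩
    rcases eq_or_lt_of_le (Nat.lt_succ_iff.mp h1) with rfl | hlt
    · exact Or.inl rfl
    · exact Or.inr ⟨hlt, h2, fun m hm hjm => h3 m (by omega) hjm⟩
  · rintro (hjp | ⟨h1, h2, h3⟩)
    · subst hjp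
      refine ⟨by omega, hc, fun m hm hjm => ?_⟩
      have : m = j + 1 := by omega
      subst this
      rw [pvBalSeg_succ s j j hp, pvBalSeg_self, hw]; omega
    · refine ⟨by omega, h2, fun m hm hjm => ?_⟩
      rcases Nat.lt_succ_iff_lt_or_eq.mp (Nat.lt_succ_of_le hm) with h | rfl
      · exact h3 m (by omega) hjm
      · rw [pvBalSeg_succ s j p hp, hw]
        have := h3 p (le_refl p) h1
        omega

theorem pvOa_succ_close (s : List Char) (p j : Nat) (hc : s[p]? = some ')') :
    pvOpenAt s (p + 1) j ↔ (pvOpenAt s p j ∧ 2 ≤ pvBalSeg s j p) := by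
  have hp : p < s.length := pvGetLt s p _ hc
  have hw : pvBalW s[p] = -1 := by
    rw [List.getElem?_eq_getElem hp] at hc
    have : s[p] = ')' := Option.some.inj hc
    rw [this]; rfl
  constructor
  · rintro ⟨h1, h2, h3⟩
    have hjp : j ≠ p := by
      rintro rfl
      rw [hc] at h2
      simp at h2
    have hjp' : j < p := by omega
    have hseg : 1 ≤ pvBalSeg s j (p + 1) := h3 (p + 1) (le_refl _) (by omega)
    rw [pvBalSeg_succ s j p hp, hw] at hseg
    exact ⟨⟨hjp', h2, fun m hm hjm => h3 m (by omega) hjm⟩, by omega⟩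
  · rintro ⟨⟨h1, h2, h3⟩, h4⟩
    refine ⟨by omega, h2, fun m hm hjm => ?_⟩
    rcases Nat.lt_succ_iff_lt_or_eq.mp (Nat.lt_succ_of_le hm) with h | rfl
    · exact h3 m (by omega) hjm
    · rw [pvBalSeg_succ s j p hp, hw]; omega

theorem pvOa_succ_other (s : List Char) (p j : Nat) (c : Char) (hc : s[p]? = some c)
    (h1 : c ≠ '(') (h2 : c ≠ ')') :
    pvOpenAt s (p + 1) j ↔ pvOpenAt s p j := by
  have hp : p < s.length := pvGetLt s p _ hc
  have hw : pvBalW s[p] = 0 := by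
    rw [List.getElem?_eq_getElem hp] at hc
    have : s[p] = c := Option.some.inj hc
    rw [this]; exact pvBalW_other c h1 h2
  constructor
  · rintro ⟨ha, hb, h3⟩
    have hjp : j ≠ p := by
      rintro rfl
      rw [hc] at hb
      exact h1 (Option.some.inj hb)
    exact ⟨by omega, hb, fun m hm hjm => h3 m (by omega) hjm⟩
  · rintro ⟨ha, hb, h3⟩
    refine ⟨by omega, hb, fun m hm hjm => ?_⟩
    rcases Nat.lt_succ_iff_lt_or_eq.mp (Nat.lt_succ_of_le hm) with h | rfl
    · exact h3 m (by omega) hjm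
    · rw [pvBalSeg_succ s j p hp, hw]
      have := h3 p (le_refl p) ha
      omega

theorem pvFilter_last (L : List Nat) (P Q : Nat → Bool) (m : Nat)
    (hsort : L.Pairwise (· < ·)) (hm : m ∈ L) (hPm : P m = true)
    (hQ : ∀ x ∈ L, Q x = true ↔ (P x = true ∧ x ≠ m))
    (hle : ∀ x ∈ L, P x = true → x ≤ m) :
    L.filter P = L.filter Q ++ [m] := by
  induction L with
  | nil => exact absurd hm (List.not_mem_nil)
  | cons a L ih =>
    have hpair := (List.pairwise_cons.mp hsort)
    by_cases ham : a = m
    · subst ham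
      have hLnil : L.filter P = [] := by
        rw [List.filter_eq_nil_iff]
        intro x hx hPx
        exact absurd (hle x (List.mem_cons_of_mem a hx) hPx) (by have := hpair.1 x hx; omega)
      have hQnil : L.filter Q = [] := by
        rw [List.filter_eq_nil_iff]
        intro x hx hQx
        have := (hQ x (List.mem_cons_of_mem a hx)).mp hQx
        exact absurd (hle x (List.mem_cons_of_mem a hx) this.1) (by have := hpair.1 x hx; omega)
      have hQa : Q a = false := by
        rcases Bool.eq_false_or_eq_true (Q a) with h | h
        · exact absurd rfl ((hQ a (List.mem_cons_self)).mp h).2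
        · exact h
      rw [List.filter_cons_of_pos hPm, List.filter_cons_of_neg (by simp [hQa]), hLnil, hQnil]
      rfl
    · have hmL : m ∈ L := by
        rcases List.mem_cons.mp hm with h | h
        · exact absurd h.symm ham
        · exact h
      have hQPa : Q a = P a := by
        rcases Bool.eq_false_or_eq_true (P a) with h | h
        · rw [h, (hQ a List.mem_cons_self).mpr ⟨h, ham⟩]
        · rcases Bool.eq_false_or_eq_true (Q a) with h' | h'
          · have := ((hQ a List.mem_cons_self).mp h').1
            rw [h] at this; exact absurd this (by simp)
          · rw [h, h']
      have ihres := ih hpair.2 hmL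
        (fun x hx => hQ x (List.mem_cons_of_mem a hx))
        (fun x hx => hle x (List.mem_cons_of_mem a hx))
      rcases Bool.eq_false_or_eq_true (P a) with h | h
      · rw [List.filter_cons_of_pos h, List.filter_cons_of_pos (by simp [hQPa, h]), ihres]
        rfl
      · rw [List.filter_cons_of_neg (by simp [h]), List.filter_cons_of_neg (by simp [hQPa, h]),
          ihres]

theorem pvSorted_getLast (L : List Nat) (hs : L.Pairwise (· < ·)) (x : Nat) (hx : x ∈ L)
    (hmax : ∀ y ∈ L, y ≤ x) : L.getLast? = some x := by
  induction L with
  | nil => exact absurd hx (List.not_mem_nil)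
  | cons a L ih =>
    have hpair := List.pairwise_cons.mp hs
    match L, hx with
    | [], hx =>
      have : x = a := by simpa using hx
      simp [this]
    | b :: L', hx =>
      have hxL : x ∈ b :: L' := by
        rcases List.mem_cons.mp hx with h | h
        · exfalso
          have hab : a < b := hpair.1 b (List.mem_cons_self)
          have := hmax b (List.mem_cons_of_mem a (List.mem_cons_self))
          omega
        · exact h
      rw [List.getLast?_cons_cons]
      exact ih hpair.2 hxL (fun y hy => hmax y (List.mem_cons_of_mem a hy))

theorem pvStack_succ_open (s : List Char) (p : Nat) (hc : s[p]? = some '(') :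
    pvStack s (p + 1) = p :: pvStack s p := by
  unfold pvStack
  rw [List.range_succ, List.filter_append]
  have h1 : List.filter (fun j => @decide (pvOpenAt s (p + 1) j) (pvOpenAtDec s (p + 1) j)) [p] = [p] := by
    have : pvOpenAt s (p + 1) p := (pvOa_succ_open s p p hc).mpr (Or.inl rfl)
    simp [this]
  have h2 : List.filter (fun j => @decide (pvOpenAt s (p + 1) j) (pvOpenAtDec s (p + 1) j)) (List.range p)
      = List.filter (fun j => @decide (pvOpenAt s p j) (pvOpenAtDec s p j)) (List.range p) := by
    apply List.filter_congr
    intro j hj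
    have hjp : j ≠ p := by have := List.mem_range.mp hj; omega
    simp only [decide_eq_decide]
    rw [pvOa_succ_open s p j hc]
    constructor
    · rintro (h | h)
      · exact absurd h hjp
      · exact h
    · exact Or.inr
  rw [h1, h2, List.reverse_append]
  rfl

theorem pvStack_succ_other (s : List Char) (p : Nat) (c : Char) (hc : s[p]? = some c)
    (h1 : c ≠ '(') (h2 : c ≠ ')') :
    pvStack s (p + 1) = pvStack s p := by
  unfold pvStack
  rw [List.range_succ, List.filter_append]
  have ha : List.filter (fun j => @decide (pvOpenAt s (p + 1) j) (pvOpenAtDec s (p + 1) j)) [p] = [] := by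
    have : ¬ pvOpenAt s (p + 1) p := by
      rintro ⟨-, hb, -⟩
      rw [hc] at hb
      exact h1 (Option.some.inj hb)
    simp [this]
  have hb : List.filter (fun j => @decide (pvOpenAt s (p + 1) j) (pvOpenAtDec s (p + 1) j)) (List.range p)
      = List.filter (fun j => @decide (pvOpenAt s p j) (pvOpenAtDec s p j)) (List.range p) := by
    apply List.filter_congr
    intro j hj
    simp only [decide_eq_decide]
    exact pvOa_succ_other s p j c hc h1 h2
  rw [ha, hb]
  simp

theorem pvStack_succ_close (s : List Char) (p : Nat) (hc : s[p]? = some ')')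
    (hex : ∃ j, pvOpenAt s p j) :
    pvStack s p = pvG s p :: pvStack s (p + 1) := by
  letI : ∀ (p' j' : Nat), Decidable (pvOpenAt s p' j') := fun p' j' => pvOpenAtDec s p' j'
  have hp : p < s.length := pvGetLt s p _ hc
  obtain ⟨hoaG, hmaxG⟩ := pvG_spec s p hex
  have hfl := pvFilter_last (List.range p)
    (fun j => @decide (pvOpenAt s p j) (pvOpenAtDec s p j)) (fun j => @decide (pvOpenAt s (p + 1) j) (pvOpenAtDec s (p + 1) j)) (pvG s p)
    (List.pairwise_lt_range) (List.mem_range.mpr hoaG.1) (decide_eq_true hoaG)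
    ?_ ?_
  · unfold pvStack
    rw [List.range_succ, List.filter_append]
    have ha : List.filter (fun j => @decide (pvOpenAt s (p + 1) j) (pvOpenAtDec s (p + 1) j)) [p] = [] := by
      have : ¬ pvOpenAt s (p + 1) p := by
        rintro ⟨-, hb, -⟩
        rw [hc] at hb
        exact absurd (Option.some.inj hb) (by decide)
      simp [this]
    rw [ha, List.append_nil, hfl, List.reverse_append]
    rfl
  · intro x hx
    simp only [decide_eq_true_eq]
    rw [pvOa_succ_close s p x hc]
    constructor
    · rintro ⟨h1, h2⟩
      refine ⟨h1, fun hxg => ?_⟩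
      rw [hxg] at h2
      rw [pvMaxOpen_balSeg_one s p (pvG s p) (by omega) hoaG hmaxG] at h2
      omega
    · rintro ⟨h1, hxg⟩
      refine ⟨h1, ?_⟩
      have hxlt : x < pvG s p := by
        rcases Nat.lt_or_ge x (pvG s p) with h | h
        · exact h
        · exfalso
          rcases Nat.lt_or_ge (pvG s p) x with h' | h'
          · exact hmaxG x h' h1
          · exact hxg (by omega)
      have hsplit := pvBalSeg_split s x (pvG s p) p
      have hb1 : 1 ≤ pvBalSeg s x (pvG s p) := h1.2.2 (pvG s p) (by have := hoaG.1; omega) hxlt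
      have hb2 : pvBalSeg s (pvG s p) p = 1 := pvMaxOpen_balSeg_one s p _ (by omega) hoaG hmaxG
      omega
  · intro x hx hPx
    have := of_decide_eq_true hPx
    rcases Nat.lt_or_ge (pvG s p) x with h' | h'
    · exact absurd this (hmaxG x h')
    · exact h'

theorem pvHead_stack (s : List Char) (p : Nat) (hex : ∃ j, pvOpenAt s p j) :
    (pvStack s p).head? = some (pvG s p) := by
  letI : ∀ (p' j' : Nat), Decidable (pvOpenAt s p' j') := fun p' j' => pvOpenAtDec s p' j'
  obtain ⟨hoaG, hmaxG⟩ := pvG_spec s p hex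
  unfold pvStack
  rw [List.head?_reverse]
  apply pvSorted_getLast
  · exact List.Pairwise.filter _ (List.pairwise_lt_range)
  · rw [List.mem_filter]
    exact ⟨List.mem_range.mpr hoaG.1, decide_eq_true hoaG⟩
  · intro y hy
    have hoy : pvOpenAt s p y := of_decide_eq_true (List.mem_filter.mp hy).2
    rcases Nat.lt_or_ge (pvG s p) y with h' | h'
    · exact absurd hoy (hmaxG y h')
    · exact h'

theorem pvDict_succ (s : List Char) (t : Nat) :
    pvDict s (t + 1) =
      pvDict s t ++ (if s[t]? = some ')' then [(pvG s t, t)] else []) := by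
  unfold pvDict
  rw [List.range_succ, List.filterMap_append]
  congr 1
  by_cases h : s[t]? = some ')' <;> simp [h]

theorem pvDict_mem (s : List Char) (t : Nat) (q : Nat × Nat) :
    q ∈ pvDict s t ↔ q.2 < t ∧ s[q.2]? = some ')' ∧ q.1 = pvG s q.2 := by
  unfold pvDict
  rw [List.mem_filterMap]
  constructor
  · rintro ⟨v, hv, hq⟩
    split at hq
    · rcases Option.some.inj hq with rfl
      exact ⟨List.mem_range.mp hv, by assumption, rfl⟩
    · exact absurd hq (by simp)
  · rintro ⟨h1, h2, h3⟩
    refine ⟨q.2, List.mem_range.mpr h1, ?_⟩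
    rw [if_pos h2]
    rw [← h3]

theorem pvBalPfx_zero (s : List Char) : pvBalPfx s 0 = 0 := rfl

theorem pvClose_facts (s : List Char) (hnn : ∀ t, t ≤ s.length → 0 ≤ pvBalPfx s t)
    (v : Nat) (hcv : s[v]? = some ')') :
    pvOpenAt s v (pvG s v) ∧ pvBalSeg s (pvG s v) v = 1 := by
  have hvn : v < s.length := pvGetLt s v _ hcv
  have hb1 : 1 ≤ pvBalPfx s v := by
    have h0 := hnn (v + 1) (by omega)
    have hstep := pvBalPfx_succ s v hvn
    have : s[v] = ')' := by
      rw [List.getElem?_eq_getElem hvn] at hcv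
      exact Option.some.inj hcv
    rw [this, pvBalW_close] at hstep
    omega
  have hseg : 1 ≤ pvBalSeg s 0 v := by unfold pvBalSeg; rw [pvBalPfx_zero]; omega
  obtain ⟨j, -, hj⟩ := pvCrossing s 0 v (by omega) (by omega) hseg
  obtain ⟨hoaG, hmaxG⟩ := pvG_spec s v ⟨j, hj⟩
  exact ⟨hoaG, pvMaxOpen_balSeg_one s v _ (by omega) hoaG hmaxG⟩

theorem pvClosed_after (s : List Char) (hnn : ∀ t, t ≤ s.length → 0 ≤ pvBalPfx s t)
    (v t' : Nat) (hcv : s[v]? = some ')') (ht : v < t') :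
    ¬ pvOpenAt s t' (pvG s v) := by
  have hvn : v < s.length := pvGetLt s v _ hcv
  obtain ⟨hoaG, hseg1⟩ := pvClose_facts s hnn v hcv
  have hw : pvBalW s[v] = -1 := by
    rw [List.getElem?_eq_getElem hvn] at hcv
    rw [Option.some.inj hcv]; rfl
  have hseg0 : pvBalSeg s (pvG s v) (v + 1) = 0 := by
    rw [pvBalSeg_succ s _ v hvn, hw]; omega
  rintro ⟨h1, h2, h3⟩
  have := h3 (v + 1) (by omega) (by have := hoaG.1; omega)
  omega

theorem pvToDict_append (L : List (Nat × Nat)) (q : Nat × Nat) :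
    pvToDict (L ++ [q]) = (pvToDict L).insert (q.1 : Int) (q.2 : Int) := by
  unfold pvToDict
  rw [List.foldl_append]
  rfl

theorem pvStack_nil (s : List Char) (hnn : ∀ t, t ≤ s.length → 0 ≤ pvBalPfx s t)
    (htot : pvBalPfx s s.length = 0) : pvStack s s.length = [] := by
  letI : ∀ (p' j' : Nat), Decidable (pvOpenAt s p' j') := fun p' j' => pvOpenAtDec s p' j'
  unfold pvStack
  rw [List.reverse_eq_nil_iff, List.filter_eq_nil_iff]
  intro j hj hdec
  obtain ⟨h1, h2, h3⟩ := of_decide_eq_true hdec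
  have hseg := h3 s.length (le_refl _) h1
  have := hnn j (by omega)
  unfold pvBalSeg at hseg
  omega

theorem pvStack_nonempty (s : List Char) (hnn : ∀ t, t ≤ s.length → 0 ≤ pvBalPfx s t)
    (t : Nat) (hct : s[t]? = some ')') : ∃ j, pvOpenAt s t j := by
  obtain ⟨hoaG, -⟩ := pvClose_facts s hnn t hct
  exact ⟨pvG s t, hoaG⟩

theorem pvFpGo_spec (s : List Char) (hnn : ∀ t, t ≤ s.length → 0 ≤ pvBalPfx s t)
    (htot : pvBalPfx s s.length = 0) :
    ∀ k t, s.length - t = k → t ≤ s.length →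
      fpGo (s.drop t) t (pvToDict (pvDict s t)) (pvToStack (pvStack s t)) =
        some (pvToDict (pvDict s s.length)) := by
  intro k
  induction k with
  | zero =>
    intro t hk ht
    have htn : t = s.length := by omega
    subst htn
    rw [List.drop_of_length_le (le_refl _), pvStack_nil s hnn htot]
    rfl
  | succ k ih =>
    intro t hk ht
    have htn : t < s.length := by omega
    rw [List.drop_eq_getElem_cons htn]
    have hget : s[t]? = some s[t] := List.getElem?_eq_getElem htn
    by_cases hc1 : s[t] = '('
    · show fpGo (s[t] :: s.drop (t + 1)) t _ _ = _
      unfold fpGo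
      rw [if_pos hc1]
      have hst : pvStack s (t + 1) = t :: pvStack s t := by
        apply pvStack_succ_open
        rw [hget, hc1]
      have hdt : pvDict s (t + 1) = pvDict s t := by
        rw [pvDict_succ]
        have : ¬ (s[t]? = some ')') := by rw [hget, hc1]; simp
        rw [if_neg this, List.append_nil]
      have := ih (t + 1) (by omega) (by omega)
      rw [hst] at this
      rw [hdt] at this
      exact this
    · by_cases hc2 : s[t] = ')'
      · show fpGo (s[t] :: s.drop (t + 1)) t _ _ = _
        unfold fpGo
        rw [if_neg hc1, if_pos hc2]
        have hct : s[t]? = some ')' := by rw [hget, hc2]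
        have hex := pvStack_nonempty s hnn t hct
        have hst : pvStack s t = pvG s t :: pvStack s (t + 1) := pvStack_succ_close s t hct hex
        have hdt : pvDict s (t + 1) = pvDict s t ++ [(pvG s t, t)] := by
          rw [pvDict_succ, if_pos hct]
        rw [hst]
        show fpGo (s.drop (t + 1)) (t + 1)
          ((pvToDict (pvDict s t)).insert ((pvG s t : Nat) : Int) (t : Int))
          (pvToStack (pvStack s (t + 1))) = _
        have := ih (t + 1) (by omega) (by omega)
        rw [hdt, pvToDict_append] at this
        exact this
      · show fpGo (s[t] :: s.drop (t + 1)) t _ _ = _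
        unfold fpGo
        rw [if_neg hc1, if_neg hc2]
        have hst : pvStack s (t + 1) = pvStack s t := pvStack_succ_other s t s[t] hget hc1 hc2
        have hdt : pvDict s (t + 1) = pvDict s t := by
          rw [pvDict_succ]
          have : ¬ (s[t]? = some ')') := by
            rw [hget]
            intro h
            exact hc2 (Option.some.inj h)
          rw [if_neg this, List.append_nil]
        have := ih (t + 1) (by omega) (by omega)
        rw [hst, hdt] at this
        exact this

theorem pvFindParens_eq (s : List Char) (hnn : ∀ t, t ≤ s.length → 0 ≤ pvBalPfx s t)
    (htot : pvBalPfx s s.length = 0) :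
    findParens s = some (pvToDict (pvDict s s.length)) := by
  have := pvFpGo_spec s hnn htot (s.length - 0) 0 rfl (by omega)
  rw [List.drop_zero] at this
  exact this

theorem pvToStack_head (L : List Nat) :
    (pvToStack L).head? = L.head?.map (fun j => (j : Int)) := by
  cases L <;> rfl

theorem pvOccs_mem (s cmp : List Char) (p : Nat) :
    p ∈ pvOccs s cmp ↔ p < s.length ∧ cmp <+: s.drop p := by
  unfold pvOccs
  rw [List.mem_filter, List.mem_range]
  constructor
  · rintro ⟨h1, h2⟩; exact ⟨h1, of_decide_eq_true h2⟩
  · rintro ⟨h1, h2⟩; exact ⟨h1, decide_eq_true h2⟩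

theorem pvOccs_sorted (s cmp : List Char) : (pvOccs s cmp).Pairwise (· < ·) :=
  List.Pairwise.filter _ (List.pairwise_lt_range)

theorem pvFilter_ge_succ (L : List Nat) (hs : L.Pairwise (· < ·)) (t : Nat) :
    L.filter (fun x => decide (t ≤ x)) =
      (if t ∈ L then [t] else []) ++ L.filter (fun x => decide (t + 1 ≤ x)) := by
  induction L with
  | nil => simp
  | cons a L ih =>
    have hpair := List.pairwise_cons.mp hs
    have ihres := ih hpair.2
    rcases Nat.lt_trichotomy a t with h | h | h
    · have h1 : ¬ (t ≤ a) := by omega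
      have h2 : ¬ (t + 1 ≤ a) := by omega
      have h3 : t ∉ (a :: L) ∨ True := Or.inr trivial
      rw [List.filter_cons_of_neg (by simp [h1]), List.filter_cons_of_neg (by simp [h2]), ihres]
      congr 1
      by_cases hm : t ∈ L
      · simp [List.mem_cons, hm]
      · have : t ∉ a :: L := by
          rw [List.mem_cons]
          rintro (rfl | hmem)
          · omega
          · exact hm hmem
        simp [this, hm]
    · subst h
      have hmem : a ∈ a :: L := List.mem_cons_self
      have hnotL : ∀ x ∈ L, a + 1 ≤ x := fun x hx => hpair.1 x hx
      rw [List.filter_cons_of_pos (by simp), List.filter_cons_of_neg (by simp), if_pos hmem]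
      show a :: _ = [a] ++ _
      rw [List.singleton_append]
      congr 1
      rw [ihres]
      have : a ∉ L := fun hx => by have := hpair.1 a hx; omega
      rw [if_neg this, List.nil_append]
    · have h1 : t ≤ a := by omega
      have h2 : t + 1 ≤ a := by omega
      have hnot : t ∉ a :: L := by
        rw [List.mem_cons]
        rintro (rfl | hmem)
        · omega
        · have := hpair.1 t hmem; omega
      rw [List.filter_cons_of_pos (by simp [h1]), List.filter_cons_of_pos (by simp [h2]),
        if_neg hnot, ihres]
      have : t ∉ L := fun hx => by have := hpair.1 t hx; omega
      rw [if_neg this, List.nil_append, List.nil_append]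

theorem pvScanGo_spec (s cmp : List Char) (hnn : ∀ t, t ≤ s.length → 0 ≤ pvBalPfx s t)
    (htot : pvBalPfx s s.length = 0)
    (hc0 : ∀ i, i < s.length → cmp <+: s.drop i → s[i]? ≠ some '(' ∧ s[i]? ≠ some ')') :
    ∀ k t, s.length - t = k → t ≤ s.length → ∀ occacc,
      scanGo cmp (s.drop t) t (pvToDict (pvDict s t)) (pvToStack (pvStack s t)) occacc =
        some (pvToDict (pvDict s s.length),
          occacc ++ ((pvOccs s cmp).filter (fun p => decide (t ≤ p))).map
            (fun p => (pvStack s p).head?.map (fun j => (j : Int)))) := by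
  intro k
  induction k with
  | zero =>
    intro t hk ht occacc
    have htn : t = s.length := by omega
    subst htn
    rw [List.drop_of_length_le (le_refl _)]
    have hfe : (pvOccs s cmp).filter (fun p => decide (s.length ≤ p)) = [] := by
      rw [List.filter_eq_nil_iff]
      intro p hp hdec
      have := (pvOccs_mem s cmp p).mp hp
      have := of_decide_eq_true hdec
      omega
    rw [hfe]
    simp [scanGo]
  | succ k ih =>
    intro t hk ht occacc
    have htn : t < s.length := by omega
    rw [List.drop_eq_getElem_cons htn]
    have hget : s[t]? = some s[t] := List.getElem?_eq_getElem htn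
    have hsplit := pvFilter_ge_succ (pvOccs s cmp) (pvOccs_sorted s cmp) t
    have hmemocc : t ∈ pvOccs s cmp ↔ cmp <+: s.drop t := by
      rw [pvOccs_mem]
      exact ⟨fun h => h.2, fun h => ⟨htn, h⟩⟩
    have hsw : PySem.Chars.startswith (s[t] :: s.drop (t + 1)) cmp = decide (cmp <+: s.drop t) := by
      unfold PySem.Chars.startswith
      rw [← List.drop_eq_getElem_cons htn]
      rcases Bool.eq_false_or_eq_true (cmp.isPrefixOf (s.drop t)) with h | h
      · rw [h, decide_eq_true (List.isPrefixOf_iff_prefix.mp h)]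
      · rw [h]
        have : ¬ (cmp <+: s.drop t) := fun hx => by
          rw [(List.isPrefixOf_iff_prefix).mpr hx] at h
          exact Bool.noConfusion h
        rw [decide_eq_false this]
    by_cases hocc : cmp <+: s.drop t
    · -- occurrence position: s[t] is neither '(' nor ')'
      obtain ⟨hq1, hq2⟩ := hc0 t htn hocc
      have hne1 : s[t] ≠ '(' := fun h => hq1 (by rw [hget, h])
      have hne2 : s[t] ≠ ')' := fun h => hq2 (by rw [hget, h])
      show scanGo cmp (s[t] :: s.drop (t + 1)) t _ _ _ = _
      unfold scanGo
      rw [if_neg hne1, if_neg hne2]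
      simp only [hsw, decide_eq_true hocc, reduceIte]
      have hst : pvStack s (t + 1) = pvStack s t := pvStack_succ_other s t s[t] hget hne1 hne2
      have hdt : pvDict s (t + 1) = pvDict s t := by
        rw [pvDict_succ]
        have : ¬ (s[t]? = some ')') := by
          rw [hget]; intro h; exact hne2 (Option.some.inj h)
        rw [if_neg this, List.append_nil]
      have ihres := ih (t + 1) (by omega) (by omega)
        (occacc ++ [(pvToStack (pvStack s t)).head?])
      rw [hst, hdt] at ihres
      rw [ihres, hsplit, if_pos (hmemocc.mpr hocc)]
      rw [List.singleton_append, List.map_cons, pvToStack_head]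
      rw [List.append_assoc, List.singleton_append]
    · show scanGo cmp (s[t] :: s.drop (t + 1)) t _ _ _ = _
      unfold scanGo
      have hoccmap : ((pvOccs s cmp).filter (fun p => decide (t ≤ p))).map
            (fun p => (pvStack s p).head?.map (fun j => (j : Int)))
          = ((pvOccs s cmp).filter (fun p => decide (t + 1 ≤ p))).map
            (fun p => (pvStack s p).head?.map (fun j => (j : Int))) := by
        rw [hsplit, if_neg (fun hx => hocc (hmemocc.mp hx)), List.nil_append]
      simp only [hsw, decide_eq_false hocc]
      by_cases hc1 : s[t] = '('
      · rw [if_pos hc1]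
        have hst : pvStack s (t + 1) = t :: pvStack s t := by
          apply pvStack_succ_open; rw [hget, hc1]
        have hdt : pvDict s (t + 1) = pvDict s t := by
          rw [pvDict_succ]
          have : ¬ (s[t]? = some ')') := by rw [hget, hc1]; simp
          rw [if_neg this, List.append_nil]
        have ihres := ih (t + 1) (by omega) (by omega) occacc
        rw [hdt] at ihres
        rw [hst] at ihres
        simp only [if_neg (by simp : ¬ (false = true))]
        rw [hoccmap]
        exact ihres
      · by_cases hc2 : s[t] = ')'
        · rw [if_neg hc1, if_pos hc2]
          have hct : s[t]? = some ')' := by rw [hget, hc2]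
          have hex := pvStack_nonempty s hnn t hct
          have hst : pvStack s t = pvG s t :: pvStack s (t + 1) := pvStack_succ_close s t hct hex
          have hdt : pvDict s (t + 1) = pvDict s t ++ [(pvG s t, t)] := by
            rw [pvDict_succ, if_pos hct]
          rw [hst]
          show scanGo cmp (s.drop (t + 1)) (t + 1)
            ((pvToDict (pvDict s t)).insert ((pvG s t : Nat) : Int) (t : Int))
            (pvToStack (pvStack s (t + 1)))
            (if false = true then occacc ++ [(pvToStack (pvStack s (t + 1))).head?] else occacc) = _
          simp only [if_neg (by simp : ¬ (false = true))]
          have ihres := ih (t + 1) (by omega) (by omega) occacc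
          rw [hdt, pvToDict_append] at ihres
          rw [hoccmap]
          exact ihres
        · rw [if_neg hc1, if_neg hc2]
          have hst : pvStack s (t + 1) = pvStack s t := pvStack_succ_other s t s[t] hget hc1 hc2
          have hdt : pvDict s (t + 1) = pvDict s t := by
            rw [pvDict_succ]
            have : ¬ (s[t]? = some ')') := by
              rw [hget]; intro h; exact hc2 (Option.some.inj h)
            rw [if_neg this, List.append_nil]
          have ihres := ih (t + 1) (by omega) (by omega) occacc
          rw [hst, hdt] at ihres
          simp only [if_neg (by simp : ¬ (false = true))]
          rw [hoccmap]
          exact ihres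

theorem pvDict_snd_lt (s : List Char) (t : Nat) :
    (pvDict s t).Pairwise (fun a b => a.2 < b.2) := by
  unfold pvDict
  rw [List.pairwise_filterMap]
  apply List.Pairwise.imp_of_mem (R := (· < ·))
  · intro a b ha hb hab q hq q' hq'
    split at hq
    · rcases Option.some.inj hq with rfl
      split at hq'
      · rcases Option.some.inj hq' with rfl
        exact hab
      · exact absurd hq' (by simp)
    · exact absurd hq (by simp)
  · exact List.pairwise_lt_range

theorem pvDict_fst_ne (s : List Char) (hnn : ∀ t, t ≤ s.length → 0 ≤ pvBalPfx s t) (t : Nat) :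
    (pvDict s t).Pairwise (fun a b => a.1 ≠ b.1) := by
  apply List.Pairwise.imp_of_mem (R := fun a b => a.2 < b.2)
  · intro a b ha hb hab heq
    obtain ⟨-, hca, hga⟩ := (pvDict_mem s t a).mp ha
    obtain ⟨-, hcb, hgb⟩ := (pvDict_mem s t b).mp hb
    have hopen : pvOpenAt s b.2 (pvG s b.2) := (pvClose_facts s hnn b.2 hcb).1
    rw [← hgb, ← heq, hga] at hopen
    exact pvClosed_after s hnn a.2 b.2 hca hab hopen
  · exact pvDict_snd_lt s t

theorem pvToDict_items (s : List Char) (hnn : ∀ t, t ≤ s.length → 0 ≤ pvBalPfx s t) (t : Nat) :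
    (pvToDict (pvDict s t)).items =
      (pvDict s t).map (fun q => ((q.1 : Int), (q.2 : Int))) := by
  unfold pvToDict
  rw [PySem.Dict.items_foldl_insert_fresh (pvDict s t) (fun q => (q.1 : Int))
    (fun q => (q.2 : Int)) PySem.Dict.empty (fun a _ => rfl) ?_]
  · rfl
  · rw [List.Nodup, List.pairwise_map]
    apply List.Pairwise.imp ?_ (pvDict_fst_ne s hnn t)
    intro a b h
    exact fun hc => h (by exact_mod_cast hc)

theorem pvGet_mk (l : List (Int × Int)) (k : Int) (v : Int) (hmem : (k, v) ∈ l)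
    (hnd : l.Pairwise (fun a b => a.1 ≠ b.1)) :
    (PySem.Dict.mk l).get? k = some v := by
  induction l with
  | nil => exact absurd hmem (List.not_mem_nil)
  | cons a l ih =>
    have hpair := List.pairwise_cons.mp hnd
    rw [show (PySem.Dict.mk (a :: l)) = PySem.Dict.mk ((a.1, a.2) :: l) from rfl,
      PySem.Dict.get?_mk_cons]
    rcases List.mem_cons.mp hmem with h | h
    · rw [← h]
      simp
    · have hne : a.1 ≠ k := by
        have := hpair.1 (k, v) h
        simpa using this
      rw [if_neg (by simpa using hne)]
      exact ih h hpair.2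

theorem pvDn_get (s : List Char) (hnn : ∀ t, t ≤ s.length → 0 ≤ pvBalPfx s t)
    (b v : Nat) (hmem : (b, v) ∈ pvDict s s.length) :
    (pvToDict (pvDict s s.length)).get? (b : Int) = some (v : Int) := by
  have hd : pvToDict (pvDict s s.length)
      = PySem.Dict.mk ((pvDict s s.length).map (fun q => ((q.1 : Int), (q.2 : Int)))) :=
    PySem.Dict.ext (pvToDict_items s hnn s.length)
  rw [hd]
  apply pvGet_mk
  · exact List.mem_map_of_mem hmem
  · rw [List.pairwise_map]
    apply List.Pairwise.imp_of_mem (R := fun a b => a.1 ≠ b.1)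
    · intro a b _ _ hne
      simpa using fun h => hne (by exact_mod_cast h)
    · exact pvDict_fst_ne s hnn s.length

theorem pvFoldlCongr {α β : Type} (l : List β) (f g : α → β → α) (a : α)
    (h : ∀ acc x, x ∈ l → f acc x = g acc x) : l.foldl f a = l.foldl g a := by
  induction l generalizing a with
  | nil => rfl
  | cons x l ih =>
    rw [List.foldl_cons, List.foldl_cons, h a x List.mem_cons_self]
    exact ih _ (fun acc y hy => h acc y (List.mem_cons_of_mem x hy))

-- the 'for key in paren_pos' fold, rewritten as a fold over the items
theorem pvKeysFold (l : List (Int × Int)) (hnd : l.Pairwise (fun a b => a.1 ≠ b.1))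
    (f : Int → Int → Int → Int) :
    ∀ a, (PySem.Dict.mk l).keys.foldl
        (fun km k => f km k ((PySem.Dict.mk l).getD k 0)) a
      = l.foldl (fun km q => f km q.1 q.2) a := by
  induction l with
  | nil => intro a; rfl
  | cons q l ih =>
    intro a
    have hpair := List.pairwise_cons.mp hnd
    rw [PySem.Dict.keys_mk, List.map_cons, List.foldl_cons, List.foldl_cons]
    have hg : (PySem.Dict.mk (q :: l)).getD q.1 0 = q.2 := by
      unfold PySem.Dict.getD
      rw [show (PySem.Dict.mk (q :: l)) = PySem.Dict.mk ((q.1, q.2) :: l) from rfl,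
        PySem.Dict.get?_mk_cons]
      simp
    rw [hg]
    have hrest : ∀ (b : Int), (List.map (fun x => x.1) l).foldl
        (fun km k => f km k ((PySem.Dict.mk (q :: l)).getD k 0)) b
      = (List.map (fun x => x.1) l).foldl
        (fun km k => f km k ((PySem.Dict.mk l).getD k 0)) b := by
      intro b
      apply pvFoldlCongr
      intro acc x hx
      have hxl : ∃ p ∈ l, p.1 = x := by
        rcases List.mem_map.mp hx with ⟨p, hp, hpx⟩
        exact ⟨p, hp, hpx⟩
      obtain ⟨p, hp, rfl⟩ := hxl
      have hne : q.1 ≠ p.1 := hpair.1 p hp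
      have : (PySem.Dict.mk (q :: l)).getD p.1 0 = (PySem.Dict.mk l).getD p.1 0 := by
        unfold PySem.Dict.getD
        rw [show (PySem.Dict.mk (q :: l)) = PySem.Dict.mk ((q.1, q.2) :: l) from rfl,
          PySem.Dict.get?_mk_cons, if_neg (by simpa using hne)]
      rw [this]
    rw [hrest (f a q.1 q.2)]
    have hih := ih hpair.2 (f a q.1 q.2)
    rw [PySem.Dict.keys_mk] at hih
    exact hih

-- the Int fold over cast pairs equals the Nat fold
theorem pvCastFold (l : List (Nat × Nat)) (p : Nat) :
    ∀ a : Nat, (l.map (fun q => ((q.1 : Int), (q.2 : Int)))).foldl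
        (fun km q => if q.1 < (p : Int) ∧ km < q.1 ∧ (p : Int) < q.2 then q.1 else km) (a : Int)
      = ((l.foldl (fun km q => if q.1 < p ∧ km < q.1 ∧ p < q.2 then q.1 else km) a : Nat) : Int) := by
  induction l with
  | nil => intro a; rfl
  | cons q l ih =>
    intro a
    rw [List.map_cons, List.foldl_cons, List.foldl_cons]
    dsimp only
    by_cases h : q.1 < p ∧ a < q.1 ∧ p < q.2
    · rw [if_pos (by push_cast; exact ⟨by exact_mod_cast h.1, by exact_mod_cast h.2.1,
        by exact_mod_cast h.2.2⟩), if_pos h]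
      exact ih q.1
    · rw [if_neg (fun hc => h ⟨by exact_mod_cast hc.1, by exact_mod_cast hc.2.1,
        by exact_mod_cast hc.2.2⟩), if_neg h]
      exact ih a

theorem pvFoldMax (p : Nat) (l : List (Nat × Nat)) :
    ∀ a : Nat,
      a ≤ l.foldl (fun km q => if q.1 < p ∧ km < q.1 ∧ p < q.2 then q.1 else km) a ∧
      (∀ q ∈ l, q.1 < p → p < q.2 →
        q.1 ≤ l.foldl (fun km q => if q.1 < p ∧ km < q.1 ∧ p < q.2 then q.1 else km) a) ∧
      (l.foldl (fun km q => if q.1 < p ∧ km < q.1 ∧ p < q.2 then q.1 else km) a = a ∨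
        ∃ q ∈ l, (q.1 < p ∧ p < q.2) ∧
          q.1 = l.foldl (fun km q => if q.1 < p ∧ km < q.1 ∧ p < q.2 then q.1 else km) a) := by
  induction l with
  | nil => exact fun a => ⟨le_refl a, fun q hq => absurd hq (List.not_mem_nil), Or.inl rfl⟩
  | cons q0 l ih =>
    intro a
    rw [List.foldl_cons]
    by_cases h : q0.1 < p ∧ a < q0.1 ∧ p < q0.2
    · rw [if_pos h]
      obtain ⟨ih1, ih2, ih3⟩ := ih q0.1
      refine ⟨by omega, ?_, ?_⟩
      · intro q hq hq1 hq2
        rcases List.mem_cons.mp hq with rfl | hq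
        · exact ih1
        · exact ih2 q hq hq1 hq2
      · rcases ih3 with h3 | ⟨q, hq, hcond, heq⟩
        · exact Or.inr ⟨q0, List.mem_cons_self, ⟨h.1, h.2.2⟩, h3.symm⟩
        · exact Or.inr ⟨q, List.mem_cons_of_mem q0 hq, hcond, heq⟩
    · rw [if_neg h]
      obtain ⟨ih1, ih2, ih3⟩ := ih a
      refine ⟨ih1, ?_, ?_⟩
      · intro q hq hq1 hq2
        rcases List.mem_cons.mp hq with rfl | hq
        · by_cases ha : a < q.1
          · exact absurd ⟨hq1, ha, hq2⟩ h
          · omega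
        · exact ih2 q hq hq1 hq2
      · rcases ih3 with h3 | ⟨q, hq, hcond, heq⟩
        · exact Or.inl h3
        · exact Or.inr ⟨q, List.mem_cons_of_mem q0 hq, hcond, heq⟩

-- every open parenthesis of a balanced string is closed later, at a ')' whose pop target it is
theorem pvCloser (s : List Char) (hnn : ∀ t, t ≤ s.length → 0 ≤ pvBalPfx s t)
    (htot : pvBalPfx s s.length = 0) (p j : Nat) (hoa : pvOpenAt s p j)
    (hne : s[p]? ≠ some ')') :
    ∃ v, p < v ∧ (j, v) ∈ pvDict s s.length := by
  classical
  have hnotn : ¬ pvOpenAt s (s.length + 1) j := by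
    rintro ⟨-, -, h3⟩
    have := h3 s.length (by omega) (by have := pvOpenAt_lt_length s p j hoa; omega)
    have hj := hnn j (by have := pvOpenAt_lt_length s p j hoa; omega)
    unfold pvBalSeg at this
    omega
  have hex : ∃ K, ¬ pvOpenAt s (p + K + 1) j := by
    refine ⟨s.length + 1 - p, ?_⟩
    intro hcon
    apply hnotn
    exact pvOpenAt_mono s (p + (s.length + 1 - p) + 1) (s.length + 1) j hcon
      (by omega) (by have := pvOpenAt_lt_length s p j hoa; omega)
  haveI : DecidablePred (fun K => ¬ pvOpenAt s (p + K + 1) j) :=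
    fun K => @instDecidableNot _ (pvOpenAtDec s (p + K + 1) j)
  set K := Nat.find hex with hK
  set v := p + K with hv
  have hnotv1 : ¬ pvOpenAt s (v + 1) j := Nat.find_spec hex
  have hoav : pvOpenAt s v j := by
    rcases Nat.eq_zero_or_pos K with h0 | hpos
    · rw [hv, h0]; exact hoa
    · have := Nat.find_min hex (m := K - 1) (by omega)
      rw [Decidable.not_not] at this
      have heq : p + (K - 1) + 1 = v := by omega
      rw [heq] at this
      exact this
  have hjlt : j < v := hoav.1
  have hseg1 : 1 ≤ pvBalSeg s j v := hoav.2.2 v (le_refl v) hjlt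
  have hseg0 : pvBalSeg s j (v + 1) ≤ 0 := by
    by_contra hcon
    apply hnotv1
    refine ⟨by omega, hoav.2.1, fun m hm hjm => ?_⟩
    rcases Nat.lt_succ_iff_lt_or_eq.mp (Nat.lt_succ_of_le hm) with hlt | rfl
    · exact hoav.2.2 m (by omega) hjm
    · omega
  have hvn : v < s.length := by
    by_contra hcon
    have h1 : pvBalPfx s (v + 1) = pvBalPfx s s.length := pvBalPfx_of_le s (v + 1) (by omega)
    have h2 : pvBalPfx s v = pvBalPfx s s.length := pvBalPfx_of_le s v (by omega)
    unfold pvBalSeg at hseg0 hseg1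
    omega
  have hstep := pvBalSeg_succ s j v hvn
  have hwv : pvBalW s[v] = -1 := by
    have h1 : pvBalW s[v] ≤ 1 ∧ -1 ≤ pvBalW s[v] := by unfold pvBalW; split_ifs <;> omega
    omega
  have hcv : s[v]? = some ')' := by
    rw [List.getElem?_eq_getElem hvn, pvBalW_eq_neg_one _ hwv]
  have hpv : p < v := by
    rcases Nat.lt_or_ge p v with h | h
    · exact h
    · exfalso
      have : v = p := by omega
      rw [this] at hcv
      exact hne hcv
  have hsegv : pvBalSeg s j v = 1 := by omega
  have hgv : pvG s v = j := by
    apply pvG_eq s v j hoav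
    intro j' hjj' hoaj'
    have hj'v : j' < v := hoaj'.1
    have hs1 : 1 ≤ pvBalSeg s j j' := hoav.2.2 j' (by omega) hjj'
    have hs2 : 1 ≤ pvBalSeg s j' v := hoaj'.2.2 v (le_refl v) hj'v
    have := pvBalSeg_split s j j' v
    omega
  refine ⟨v, hpv, (pvDict_mem s s.length (j, v)).mpr ⟨hvn, hcv, hgv.symm⟩⟩

theorem pvKeyMaxA_eq (s : List Char) (hnn : ∀ t, t ≤ s.length → 0 ≤ pvBalPfx s t)
    (htot : pvBalPfx s s.length = 0) (p : Nat) (c : Char) (hcp : s[p]? = some c)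
    (hc1 : c ≠ '(') (hc2 : c ≠ ')') (hbp : 1 ≤ pvBalPfx s p) :
    keyMaxA (pvToDict (pvDict s s.length)) (p : Int) = ((pvG s p : Nat) : Int) := by
  have hpn : p < s.length := pvGetLt s p c hcp
  have hex : ∃ j, pvOpenAt s p j := by
    obtain ⟨j, -, hj⟩ := pvCrossing s 0 p (by omega) (by omega)
      (by unfold pvBalSeg; rw [pvBalPfx_zero]; omega)
    exact ⟨j, hj⟩
  obtain ⟨hoaG, hmaxG⟩ := pvG_spec s p hex
  have hd : pvToDict (pvDict s s.length)
      = PySem.Dict.mk ((pvDict s s.length).map (fun q => ((q.1 : Int), (q.2 : Int)))) :=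
    PySem.Dict.ext (pvToDict_items s hnn s.length)
  unfold keyMaxA
  rw [hd]
  have hndmap : ((pvDict s s.length).map (fun q => ((q.1 : Int), (q.2 : Int)))).Pairwise
      (fun a b => a.1 ≠ b.1) := by
    rw [List.pairwise_map]
    apply List.Pairwise.imp_of_mem (R := fun a b => a.1 ≠ b.1)
    · intro a b _ _ hne
      simpa using fun h => hne (by exact_mod_cast h)
    · exact pvDict_fst_ne s hnn s.length
  rw [pvKeysFold _ hndmap (fun km k v => if k < (p : Int) ∧ km < k ∧ (p : Int) < v then k else km) 0]
  rw [show (0 : Int) = ((0 : Nat) : Int) from rfl, pvCastFold]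
  congr 1
  -- the Nat-level fold computes pvG s p
  obtain ⟨h1, h2, h3⟩ := pvFoldMax p (pvDict s s.length) 0
  set m := (pvDict s s.length).foldl
    (fun km q => if q.1 < p ∧ km < q.1 ∧ p < q.2 then q.1 else km) 0 with hm
  -- every qualifying pair's first component is an open parenthesis at p, hence ≤ pvG s p
  have hub : ∀ q ∈ pvDict s s.length, q.1 < p → p < q.2 → q.1 ≤ pvG s p := by
    intro q hq hq1 hq2
    obtain ⟨hq2n, hqc, hqg⟩ := (pvDict_mem s s.length q).mp hq
    have hopen : pvOpenAt s q.2 q.1 := by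
      rw [hqg]; exact (pvClose_facts s hnn q.2 hqc).1
    have hopenp : pvOpenAt s p q.1 := pvOpenAt_mono s q.2 p q.1 hopen (by omega) hq1
    rcases Nat.lt_or_ge (pvG s p) q.1 with h | h
    · exact absurd hopenp (hmaxG q.1 h)
    · exact h
  -- pvG s p itself appears as a qualifying pair
  obtain ⟨v, hvp, hvmem⟩ := pvCloser s hnn htot p (pvG s p) hoaG
    (by rw [hcp]; intro h; exact hc2 (Option.some.inj h))
  have hGm : pvG s p ≤ m := h2 (pvG s p, v) hvmem hoaG.1 hvp
  rcases h3 with h0 | ⟨q, hq, ⟨hq1, hq2⟩, hqm⟩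
  · omega
  · have := hub q hq hq1 hq2
    omega

theorem pvFbGo_spec (s cmp : List Char) (D : PySem.Dict Int Int) (hl2 : cmp.length = 2)
    (hiso : ∀ p, p ∈ pvOccs s cmp → p + 1 ∉ pvOccs s cmp) :
    ∀ fuel k acc, k ≤ s.length →
      ((pvOccs s cmp).filter (fun x => decide (k ≤ x))).length < fuel →
      fbGo s D cmp fuel (PySem.Chars.findFrom s cmp (k : Int) none) acc
        = acc ++ ((pvOccs s cmp).filter (fun x => decide (k ≤ x))).map
            (fun p : Nat => keyMaxA D ((p : Nat) : Int)) := by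
  intro fuel
  induction fuel with
  | zero => intro k acc hk hlen; omega
  | succ fuel ih =>
    intro k acc hk hlen
    rw [PySem.Chars.findFrom_natCast s cmp k hk]
    by_cases hocc : cmp <:+: s.drop k
    · have hr0 : 0 ≤ PySem.Chars.find (s.drop k) cmp :=
        (PySem.Chars.find_nonneg_iff (s.drop k) cmp).mpr hocc
      have hrne : ¬ (PySem.Chars.find (s.drop k) cmp = -1) := by omega
      rw [if_neg hrne]
      obtain ⟨hpre, hmin⟩ := PySem.Chars.find_spec (s := s.drop k) (sub := cmp) hr0
      set r := (PySem.Chars.find (s.drop k) cmp).toNat with hrdef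
      set p := k + r with hpdef
      have hcast : (k : Int) + PySem.Chars.find (s.drop k) cmp = ((p : Nat) : Int) := by
        rw [hpdef]
        push_cast
        rw [Int.toNat_of_nonneg hr0]
      rw [hcast]
      have hoccp : cmp <+: s.drop p := by
        rw [List.drop_drop] at hpre
        exact hpre
      have hp2n : p + 2 ≤ s.length := by
        have := hoccp.length_le
        rw [List.length_drop, hl2] at this
        omega
      have hpmem : p ∈ pvOccs s cmp := (pvOccs_mem s cmp p).mpr ⟨by omega, hoccp⟩
      have hminp : ∀ i, k ≤ i → i < p → ¬ cmp <+: s.drop i := by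
        intro i hki hip hcon
        have := hmin (i - k) (by omega)
        rw [List.drop_drop, show k + (i - k) = i by omega] at this
        exact this hcon
      -- the occurrences ≥ k are exactly p followed by the occurrences ≥ p + 2
      have hsplit : (pvOccs s cmp).filter (fun x => decide (k ≤ x))
          = p :: (pvOccs s cmp).filter (fun x => decide (p + 2 ≤ x)) := by
        have e1 : (pvOccs s cmp).filter (fun x => decide (k ≤ x))
            = (pvOccs s cmp).filter (fun x => decide (p ≤ x)) := by
          apply List.filter_congr
          intro x hx
          obtain ⟨hxn, hxocc⟩ := (pvOccs_mem s cmp x).mp hx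
          by_cases hkx : k ≤ x
          · have hpx : p ≤ x := by
              by_contra hcon
              exact hminp x hkx (by omega) hxocc
            rw [decide_eq_true hkx, decide_eq_true hpx]
          · have : ¬ (p ≤ x) := by omega
            rw [decide_eq_false hkx, decide_eq_false this]
        have e2 : (pvOccs s cmp).filter (fun x => decide (p + 1 ≤ x))
            = (pvOccs s cmp).filter (fun x => decide (p + 2 ≤ x)) := by
          apply List.filter_congr
          intro x hx
          by_cases hx1 : p + 1 ≤ x
          · have hxne : x ≠ p + 1 := by
              intro hcon
              exact hiso p hpmem (hcon ▸ hx)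
            have : p + 2 ≤ x := by omega
            rw [decide_eq_true hx1, decide_eq_true this]
          · have : ¬ (p + 2 ≤ x) := by omega
            rw [decide_eq_false hx1, decide_eq_false this]
        rw [e1, pvFilter_ge_succ (pvOccs s cmp) (pvOccs_sorted s cmp) p, if_pos hpmem, e2]
        rfl
      show fbGo s D cmp (fuel + 1) ((p : Nat) : Int) acc = _
      unfold fbGo
      rw [if_neg (by omega)]
      have harg : ((p : Nat) : Int) + 2 = (((p + 2 : Nat)) : Int) := by push_cast; ring
      rw [harg]
      have ihres := ih (p + 2) (acc ++ [keyMaxA D ((p : Nat) : Int)]) hp2n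
        (by rw [hsplit] at hlen; simp at hlen; omega)
      rw [ihres, hsplit, List.map_cons, List.append_assoc, List.singleton_append]
    · have hfe : PySem.Chars.find (s.drop k) cmp = -1 :=
        (PySem.Chars.find_eq_neg_one_iff (s.drop k) cmp).mpr hocc
      rw [if_pos hfe]
      have hfnil : (pvOccs s cmp).filter (fun x => decide (k ≤ x)) = [] := by
        rw [List.filter_eq_nil_iff]
        intro x hx hdec
        obtain ⟨hxn, hxocc⟩ := (pvOccs_mem s cmp x).mp hx
        have hkx : k ≤ x := of_decide_eq_true hdec
        apply hocc
        have : cmp <+: (s.drop k).drop (x - k) := by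
          rw [List.drop_drop, show k + (x - k) = x by omega]
          exact hxocc
        exact this.isInfix.trans (List.drop_suffix _ _).isInfix
      rw [hfnil]
      show fbGo s D cmp (fuel + 1) (-1) acc = acc ++ []
      unfold fbGo
      rw [if_pos rfl, List.append_nil]

theorem pvFindBinOpBegin_eq (s cmp : List Char) (D : PySem.Dict Int Int) (hl2 : cmp.length = 2)
    (hiso : ∀ p, p ∈ pvOccs s cmp → p + 1 ∉ pvOccs s cmp) :
    findBinOpBegin s D cmp = (pvOccs s cmp).map (fun p : Nat => keyMaxA D ((p : Nat) : Int)) := by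
  unfold findBinOpBegin
  have h0 : PySem.Chars.find s cmp = PySem.Chars.findFrom s cmp ((0 : Nat) : Int) none := by
    rw [show (((0 : Nat)) : Int) = (0 : Int) from rfl, PySem.Chars.findFrom_zero]
  rw [h0]
  have hall : (pvOccs s cmp).filter (fun x => decide (0 ≤ x)) = pvOccs s cmp := by
    simp
  have := pvFbGo_spec s cmp D hl2 hiso (s.length + 1) 0 [] (by omega)
    (by rw [hall]; have := List.length_filter_le (fun i => decide (cmp <+: s.drop i))
          (List.range s.length)
        unfold pvOccs
        have hr := List.length_range (n := s.length)
        omega)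
  rw [hall] at this
  rw [this, List.nil_append]

-- length facts about Chars.splitOn when the separator occurs
theorem pvSplitGo_len1 (sep : List Char) :
    ∀ fuel l cur acc, acc.length + 1 ≤ (PySem.Chars.splitOn.go sep fuel l cur acc).length := by
  intro fuel
  induction fuel with
  | zero => intro l cur acc; simp [PySem.Chars.splitOn.go]
  | succ fuel ih =>
    intro l cur acc
    match l with
    | [] => simp [PySem.Chars.splitOn.go]
    | c :: rest =>
      show acc.length + 1 ≤ (if sep.isPrefixOf (c :: rest) = true then
          PySem.Chars.splitOn.go sep fuel (List.drop sep.length (c :: rest)) [] (cur.reverse :: acc)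
        else PySem.Chars.splitOn.go sep fuel rest (c :: cur) acc).length
      split
      · have := ih (List.drop sep.length (c :: rest)) [] (cur.reverse :: acc)
        simp at this
        omega
      · exact ih rest (c :: cur) acc

theorem pvSplitGo_len2 (sep : List Char) (hne : sep ≠ []) :
    ∀ fuel l cur acc, sep <:+: l → l.length < fuel →
      acc.length + 2 ≤ (PySem.Chars.splitOn.go sep fuel l cur acc).length := by
  intro fuel
  induction fuel with
  | zero => intro l cur acc hin hlen; omega
  | succ fuel ih =>
    intro l cur acc hin hlen
    match l, hin, hlen with
    | [], hin, hlen =>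
      exfalso
      rcases hin with ⟨t1, t2, ht⟩
      simp_all
    | c :: rest, hin, hlen =>
      show acc.length + 2 ≤ (if sep.isPrefixOf (c :: rest) = true then
          PySem.Chars.splitOn.go sep fuel (List.drop sep.length (c :: rest)) [] (cur.reverse :: acc)
        else PySem.Chars.splitOn.go sep fuel rest (c :: cur) acc).length
      split
      · have := pvSplitGo_len1 sep fuel (List.drop sep.length (c :: rest)) [] (cur.reverse :: acc)
        simp at this
        omega
      · have hnp : ¬ sep <+: (c :: rest) := by
          intro hcon
          rw [← List.isPrefixOf_iff_prefix (l₁ := sep) (l₂ := c :: rest)] at hcon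
          simp_all
        have hrest : sep <:+: rest := by
          rcases List.infix_cons_iff.mp hin with h | h
          · exact absurd h hnp
          · exact h
        have := ih rest (c :: cur) acc hrest (by simp at hlen; omega)
        omega

theorem pvSplitOn_two (sub sep : List Char) (hne : sep ≠ []) (hin : sep <:+: sub) :
    ∃ p0 p1 r, PySem.Chars.splitOn sub sep = p0 :: p1 :: r := by
  have h2 : 2 ≤ (PySem.Chars.splitOn sub sep).length := by
    have := pvSplitGo_len2 sep hne (sub.length + 1) sub [] [] hin (by omega)
    simpa [PySem.Chars.splitOn] using this
  match hsp : PySem.Chars.splitOn sub sep with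
  | [] => rw [hsp] at h2; simp at h2
  | [x] => rw [hsp] at h2; simp at h2
  | p0 :: p1 :: r => exact ⟨p0, p1, r, rfl⟩

-- the separator ' '++cmp++' ' occurs inside the slice s[b:e+1]
theorem pvSub_infix (s cmp : List Char) (hl2 : cmp.length = 2) (p b e : Nat)
    (hbp : b + 2 ≤ p) (hep : p + 3 ≤ e) (hen : e < s.length)
    (hocc : cmp <+: s.drop p) (hm1 : s[p - 1]? = some ' ') (hp2 : s[p + 2]? = some ' ') :
    (' ' :: (cmp ++ [' '])) <:+: (s.drop b).take (e + 1 - b) := by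
  have hp1n : p - 1 < s.length := by omega
  have hp2n : p + 2 < s.length := by omega
  have hdp1 : s.drop (p - 1) = ' ' :: s.drop p := by
    rw [List.drop_eq_getElem_cons hp1n, show p - 1 + 1 = p by omega]
    rw [List.getElem?_eq_getElem hp1n] at hm1
    rw [Option.some.inj hm1]
  have hdp2 : s.drop (p + 2) = ' ' :: s.drop (p + 3) := by
    rw [List.drop_eq_getElem_cons hp2n]
    rw [List.getElem?_eq_getElem hp2n] at hp2
    rw [Option.some.inj hp2]
  have hsp : s.drop p = cmp ++ s.drop (p + 2) := by
    obtain ⟨t, ht⟩ := hocc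
    have htl : t = s.drop (p + 2) := by
      have := congrArg (List.drop cmp.length) ht
      rw [List.drop_left, List.drop_drop, hl2] at this
      rw [← this]
    rw [← ht, htl]
  have hpref : (' ' :: (cmp ++ [' '])) <+: s.drop (p - 1) := by
    rw [hdp1, hsp, hdp2]
    refine ⟨s.drop (p + 3), ?_⟩
    simp
  have hlen4 : (' ' :: (cmp ++ [' '])).length = 4 := by simp [hl2]
  have hdt : ((s.drop b).take (e + 1 - b)).drop (p - 1 - b)
      = (s.drop (p - 1)).take (e + 2 - p) := by
    rw [List.drop_take, List.drop_drop, show b + (p - 1 - b) = p - 1 by omega,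
      show e + 1 - b - (p - 1 - b) = e + 2 - p by omega]
  have hpt : (' ' :: (cmp ++ [' '])) <+: ((s.drop b).take (e + 1 - b)).drop (p - 1 - b) := by
    rw [hdt, List.prefix_take_iff]
    exact ⟨hpref, by omega⟩
  exact hpt.isInfix.trans (List.drop_suffix _ _).isInfix

-- the loop bodies of the two eq_dict/repl loops, as named functions
def pvStepA (s : List Char) (D : PySem.Dict Int Int) (sep sym : List Char)
    (acc : Option (PySem.Dict (List Char) (List Char))) (b : Int) :
    Option (PySem.Dict (List Char) (List Char)) :=
  acc.bind (fun ed =>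
    match D.get? b with
    | none => none
    | some e =>
      let sub := PySem.List.slice s (some b) (some (e + 1))
      match PySem.Chars.splitOn sub sep with
      | p0 :: p1 :: _ => some (ed.insert sub (sym ++ p0 ++ [','] ++ p1))
      | _ => none)

def pvStepB (M : PySem.Dict Int Int) (s sep sym : List Char)
    (acc : Option (PySem.Dict (List Char) (List Char))) (ob : Option Int) :
    Option (PySem.Dict (List Char) (List Char)) :=
  acc.bind (fun rd =>
    match ob with
    | none => some rd
    | some b =>
      match M.get? b with
      | none => none
      | some e =>
        let sub := PySem.List.slice s (some b) (some (e + 1))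
        match PySem.Chars.splitOn sub sep with
        | p0 :: p1 :: _ => some (rd.insert sub (sym ++ p0 ++ [','] ++ p1))
        | _ => some rd)

theorem pvBuildA_eq_fold (s : List Char) (D : PySem.Dict Int Int) (sep sym : List Char)
    (begins : List Int) :
    buildA s D sep sym begins = begins.foldl (pvStepA s D sep sym) (some PySem.Dict.empty) := rfl

theorem pvBuildB_eq_fold (M : PySem.Dict Int Int) (s sep sym : List Char)
    (occs : List (Option Int)) :
    buildB M s sep sym occs = occs.foldl (pvStepB M s sep sym) (some PySem.Dict.empty) := rfl

theorem pvBuildFold_eq (s : List Char) (D : PySem.Dict Int Int) (sep sym : List Char)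
    (ps : List Nat)
    (hfacts : ∀ p ∈ ps, ∃ e : Nat, D.get? ((pvG s p : Nat) : Int) = some ((e : Nat) : Int) ∧
      ∃ p0 p1 r, PySem.Chars.splitOn
        (PySem.List.slice s (some ((pvG s p : Nat) : Int)) (some (((e : Nat) : Int) + 1))) sep
        = p0 :: p1 :: r) :
    ∀ d : PySem.Dict (List Char) (List Char),
      (ps.map (fun p => ((pvG s p : Nat) : Int))).foldl (pvStepA s D sep sym) (some d)
        = (ps.map (fun p => some ((pvG s p : Nat) : Int))).foldl (pvStepB D s sep sym) (some d) := by
  induction ps with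
  | nil => intro d; rfl
  | cons p ps ih =>
    intro d
    obtain ⟨e, hget, p0, p1, r, hsplit⟩ := hfacts p List.mem_cons_self
    rw [List.map_cons, List.map_cons, List.foldl_cons, List.foldl_cons]
    have hstepA : pvStepA s D sep sym (some d) ((pvG s p : Nat) : Int)
        = some (d.insert (PySem.List.slice s (some ((pvG s p : Nat) : Int))
            (some (((e : Nat) : Int) + 1)))
            (sym ++ p0 ++ [','] ++ p1)) := by
      simp only [pvStepA, Option.bind_some, hget, hsplit]
    have hstepB : pvStepB D s sep sym (some d) (some ((pvG s p : Nat) : Int))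
        = some (d.insert (PySem.List.slice s (some ((pvG s p : Nat) : Int))
            (some (((e : Nat) : Int) + 1)))
            (sym ++ p0 ++ [','] ++ p1)) := by
      simp only [pvStepB, Option.bind_some, hget, hsplit]
    rw [hstepA, hstepB]
    exact ih (fun q hq => hfacts q (List.mem_cons_of_mem p hq)) _

-- shared output shape of both ports after the dictionaries are built
def pvWrap (s : List Char) (o : Option (PySem.Dict (List Char) (List Char))) : String :=
  match o with
  | none => ""
  | some d => String.mk (d.items.foldl
      (fun e (kv : List Char × List Char) => PySem.Chars.replace e kv.1 kv.2) s)

def pvOutA (s cmp sym : List Char) : String :=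
  match findParens s with
  | none => ""
  | some D => pvWrap s (buildA s D (' ' :: (cmp ++ [' '])) sym (findBinOpBegin s D cmp))

def pvOutB (s cmp sym : List Char) : String :=
  match scanGo cmp s 0 PySem.Dict.empty [] [] with
  | none => ""
  | some (M, occs) => pvWrap s (buildB M s (' ' :: (cmp ++ [' '])) sym occs)

theorem pvPortA_false (eq : String) :
    split_equation eq false = pvOutA eq.toList ['~', '='] ['N', 'e'] := rfl
theorem pvPortA_true (eq : String) :
    split_equation eq true = pvOutA eq.toList ['=', '='] ['E', 'q'] := rfl
theorem pvPortB_false (eq : String) :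
    split_equation_alt eq false = pvOutB eq.toList ['~', '='] ['N', 'e'] := rfl
theorem pvPortB_true (eq : String) :
    split_equation_alt eq true = pvOutB eq.toList ['=', '='] ['E', 'q'] := rfl

theorem pvCore (s cmp sym : List Char) (hl2 : cmp.length = 2)
    (hcnp : ∀ c ∈ cmp, c ≠ '(' ∧ c ≠ ')' ∧ c ≠ ' ')
    (hnn : ∀ t, t ≤ s.length → 0 ≤ pvBalPfx s t)
    (htot : pvBalPfx s s.length = 0)
    (hO : ∀ i, i < s.length → cmp <+: s.drop i →
      1 ≤ pvBalPfx s i ∧ 1 ≤ i ∧ s[i - 1]? = some ' ' ∧ s[i + 2]? = some ' ') :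
    pvOutA s cmp sym = pvOutB s cmp sym := by
  obtain ⟨c0, r2, rfl⟩ : ∃ c0 r2, cmp = c0 :: r2 := by
    cases cmp with
    | nil => simp at hl2
    | cons c0 r2 => exact ⟨c0, r2, rfl⟩
  obtain ⟨c1, rfl⟩ : ∃ c1, r2 = [c1] := by
    cases r2 with
    | nil => simp at hl2
    | cons c1 r3 =>
      cases r3 with
      | nil => exact ⟨c1, rfl⟩
      | cons _ _ => simp at hl2
  set cmp := [c0, c1] with hcmp
  have hc0 : c0 ≠ '(' ∧ c0 ≠ ')' ∧ c0 ≠ ' ' := hcnp c0 (by simp [hcmp])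
  have hc1 : c1 ≠ '(' ∧ c1 ≠ ')' ∧ c1 ≠ ' ' := hcnp c1 (by simp [hcmp])
  have hchar0 : ∀ i, cmp <+: s.drop i → s[i]? = some c0 := by
    intro i hocc
    obtain ⟨t, ht⟩ := hocc
    have : s[i]? = (s.drop i)[0]? := by
      simp [List.getElem?_drop]
    rw [this, ← ht]
    rfl
  have hchar1 : ∀ i, cmp <+: s.drop i → s[i + 1]? = some c1 := by
    intro i hocc
    obtain ⟨t, ht⟩ := hocc
    have : s[i + 1]? = (s.drop i)[1]? := by
      simp [List.getElem?_drop]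
    rw [this, ← ht]
    rfl
  have hc0scan : ∀ i, i < s.length → cmp <+: s.drop i →
      s[i]? ≠ some '(' ∧ s[i]? ≠ some ')' := by
    intro i hi hocc
    rw [hchar0 i hocc]
    exact ⟨fun h => hc0.1 (Option.some.inj h), fun h => hc0.2.1 (Option.some.inj h)⟩
  have hiso : ∀ p, p ∈ pvOccs s cmp → p + 1 ∉ pvOccs s cmp := by
    intro p hp hp1
    obtain ⟨hpn, hpocc⟩ := (pvOccs_mem s cmp p).mp hp
    obtain ⟨hp1n, hp1occ⟩ := (pvOccs_mem s cmp (p + 1)).mp hp1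
    obtain ⟨-, -, hsp, -⟩ := hO (p + 1) hp1n hp1occ
    rw [show p + 1 - 1 = p by omega, hchar0 p hpocc] at hsp
    exact hc0.2.2 (Option.some.inj hsp)
  have hfp' : findParens s = some (pvToDict (pvDict s s.length)) := pvFindParens_eq s hnn htot
  -- per-occurrence facts
  have hperocc : ∀ p ∈ pvOccs s cmp,
      keyMaxA (pvToDict (pvDict s s.length)) ((p : Nat) : Int) = ((pvG s p : Nat) : Int) ∧
      (pvStack s p).head? = some (pvG s p) ∧
      (∃ e : Nat, (pvToDict (pvDict s s.length)).get? ((pvG s p : Nat) : Int)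
          = some ((e : Nat) : Int) ∧
        ∃ p0 p1 r, PySem.Chars.splitOn
          (PySem.List.slice s (some ((pvG s p : Nat) : Int)) (some (((e : Nat) : Int) + 1)))
          (' ' :: (cmp ++ [' ']))
          = p0 :: p1 :: r) := by
    intro p hp
    obtain ⟨hpn, hpocc⟩ := (pvOccs_mem s cmp p).mp hp
    obtain ⟨hbp1, hp1, hsm1, hsp2⟩ := hO p hpn hpocc
    have hcp : s[p]? = some c0 := hchar0 p hpocc
    have hex : ∃ j, pvOpenAt s p j := by
      obtain ⟨j, -, hj⟩ := pvCrossing s 0 p (by omega) (by omega)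
        (by unfold pvBalSeg; rw [pvBalPfx_zero]; omega)
      exact ⟨j, hj⟩
    obtain ⟨hoaG, hmaxG⟩ := pvG_spec s p hex
    have hkm := pvKeyMaxA_eq s hnn htot p c0 hcp hc0.1 hc0.2.1 hbp1
    have hhead := pvHead_stack s p hex
    obtain ⟨v, hvp, hvmem⟩ := pvCloser s hnn htot p (pvG s p) hoaG
      (by rw [hcp]; intro h; exact hc0.2.1 (Option.some.inj h))
    obtain ⟨hvn, hvc, -⟩ := (pvDict_mem s s.length (pvG s p, v)).mp hvmem
    have hget := pvDn_get s hnn (pvG s p) v hvmem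
    -- bounds to place the separator inside the slice
    have hbneq : pvG s p ≠ p - 1 := by
      intro hcon
      have := hoaG.2.1
      rw [hcon, hsm1] at this
      exact absurd (Option.some.inj this) (by decide)
    have hblt : pvG s p < p := hoaG.1
    have hbp : pvG s p + 2 ≤ p := by
      rcases Nat.lt_or_ge (pvG s p + 2) (p + 1) with h | h
      · omega
      · exfalso; exact hbneq (by omega)
    have hvne1 : v ≠ p + 1 := by
      intro hcon
      rw [hcon] at hvc
      rw [hchar1 p hpocc] at hvc
      exact hc1.2.1 (Option.some.inj hvc)
    have hvne2 : v ≠ p + 2 := by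
      intro hcon
      rw [hcon, hsp2] at hvc
      exact absurd (Option.some.inj hvc) (by decide)
    have hep : p + 3 ≤ v := by omega
    have hinf := pvSub_infix s cmp hl2 p (pvG s p) v hbp hep hvn hpocc hsm1 hsp2
    have hslice : PySem.List.slice s (some ((pvG s p : Nat) : Int)) (some (((v : Nat) : Int) + 1))
        = (s.drop (pvG s p)).take (v + 1 - pvG s p) := by
      rw [show (((v : Nat) : Int) + 1) = (((v + 1 : Nat)) : Int) by push_cast; ring,
        PySem.List.slice_natCast]
    obtain ⟨p0, p1, r, hsp⟩ := pvSplitOn_two ((s.drop (pvG s p)).take (v + 1 - pvG s p))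
      (' ' :: (cmp ++ [' '])) (by simp) hinf
    exact ⟨hkm, hhead, v, hget, p0, p1, r, by rw [hslice]; exact hsp⟩
  -- the begin list of A and the occurrence list of B
  have hbegins : findBinOpBegin s (pvToDict (pvDict s s.length)) cmp
      = (pvOccs s cmp).map (fun p : Nat => ((pvG s p : Nat) : Int)) := by
    rw [pvFindBinOpBegin_eq s cmp _ hl2 hiso]
    apply List.map_congr_left
    intro p hp
    exact (hperocc p hp).1
  have hscan0 := pvScanGo_spec s cmp hnn htot hc0scan (s.length - 0) 0 rfl (by omega) []
  rw [List.drop_zero, List.nil_append] at hscan0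
  have hall : (pvOccs s cmp).filter (fun p => decide (0 ≤ p)) = pvOccs s cmp := by simp
  rw [hall] at hscan0
  have hoccsB : (pvOccs s cmp).map
        (fun p => (pvStack s p).head?.map (fun j => (j : Int)))
      = (pvOccs s cmp).map (fun p : Nat => some ((pvG s p : Nat) : Int)) := by
    apply List.map_congr_left
    intro p hp
    rw [(hperocc p hp).2.1]
    rfl
  rw [hoccsB] at hscan0
  have hscan' : scanGo cmp s 0 PySem.Dict.empty [] []
      = some (pvToDict (pvDict s s.length),
          (pvOccs s cmp).map (fun p : Nat => some ((pvG s p : Nat) : Int))) := hscan0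
  have hbuild : buildA s (pvToDict (pvDict s s.length)) (' ' :: (cmp ++ [' '])) sym
        (findBinOpBegin s (pvToDict (pvDict s s.length)) cmp)
      = buildB (pvToDict (pvDict s s.length)) s (' ' :: (cmp ++ [' '])) sym
        ((pvOccs s cmp).map (fun p : Nat => some ((pvG s p : Nat) : Int))) := by
    rw [hbegins, pvBuildA_eq_fold, pvBuildB_eq_fold]
    exact pvBuildFold_eq s (pvToDict (pvDict s s.length)) (' ' :: (cmp ++ [' '])) sym
      (pvOccs s cmp) (fun p hp => (hperocc p hp).2.2) PySem.Dict.empty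
  unfold pvOutA pvOutB
  rw [hfp', hscan']
  dsimp only
  rw [hbuild]

theorem pvChars_ok (a b : Char) (h1 : a ≠ '(' ∧ a ≠ ')' ∧ a ≠ ' ')
    (h2 : b ≠ '(' ∧ b ≠ ')' ∧ b ≠ ' ') :
    ∀ c ∈ [a, b], c ≠ '(' ∧ c ≠ ')' ∧ c ≠ ' ' := by
  intro c hc
  rcases List.mem_cons.mp hc with rfl | hc
  · exact h1
  · rcases List.mem_cons.mp hc with rfl | hc
    · exact h2
    · exact absurd hc (List.not_mem_nil)

-- ===== VERDICT (by name: the statement is the Claim_ definition above) =====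
theorem split_equation_spec : Claim_equal_split_equation := by
  intro eq is_equal hdom hpre
  unfold Spec_split_equation
  unfold Pre_split_equation at hpre
  obtain ⟨hnn, htot, hO⟩ := hpre
  cases is_equal
  · rw [pvPortA_false, pvPortB_false]
    simp only [Bool.false_eq_true, if_false] at hO
    have hc := pvCore eq.toList ['~', '='] ['N', 'e'] rfl (pvChars_ok '~' '='
      ⟨by decide, by decide, by decide⟩ ⟨by decide, by decide, by decide⟩) hnn htot hO
    exact hc
  · rw [pvPortA_true, pvPortB_true]
    simp only [if_true] at hO
    have hc := pvCore eq.toList ['=', '='] ['E', 'q'] rfl (pvChars_ok '=' '='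
      ⟨by decide, by decide, by decide⟩ ⟨by decide, by decide, by decide⟩) hnn htot hO
    exact hc
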